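-- pv_equiv track=rewrite | github.com/Terra0305/Algorithm-Archive | python/프로그래머스_고득점킷_기능개발.py | solution
-- ===== SOURCE A (Python) =====
-- def solution(progresses, speeds):
--     answer = []
--
--     while len(progresses)>0:
--         for i in range(len(progresses)):
--             progresses[i]+=speeds[i]
--         success=0
--
--         while len(progresses)>0 and progresses[0]>=100:
--             success+=1
--             progresses.pop(0)
--             speeds.pop(0)
--
--         if success >0:
--             answer.append(success)
--
--     return answer
-- ===== SOURCE B (Python) =====
-- def solution(progresses, speeds):
--     # O(n): days needed per task (ceil), then group by running leader day.
--     days = [max(1, -(-(100 - p) // s)) for p, s in zip(progresses, speeds)]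
--     answer = []
--     i = 0
--     n = len(days)
--     while i < n:
--         lead = days[i]
--         j = i + 1
--         while j < n and days[j] <= lead:
--             j += 1
--         answer.append(j - i)
--         i = j
--     return answer
-- ===== Notes on version B (the rewrite author's own statement) =====
-- stated objective: faster
-- what changed: Instead of simulating progress day by day with repeated in-place pops, B computes each task's finish day in closed form (ceiling division) and makes one pass grouping consecutive tasks by the running leader's finish day; intended as faster (a timing run saw A time out at n=16 where B returned, so no ratio was measured).
-- outside the precondition, e.g. on solution([10], [0]): A does not finish within the time limit, B raises ZeroDivisionError; on solution([150, 90], [-1, 5]): A returns [1, 1], B returns [2]; on solution([150], [-1]): A returns [1], B returns [1]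
import Mathlib
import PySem

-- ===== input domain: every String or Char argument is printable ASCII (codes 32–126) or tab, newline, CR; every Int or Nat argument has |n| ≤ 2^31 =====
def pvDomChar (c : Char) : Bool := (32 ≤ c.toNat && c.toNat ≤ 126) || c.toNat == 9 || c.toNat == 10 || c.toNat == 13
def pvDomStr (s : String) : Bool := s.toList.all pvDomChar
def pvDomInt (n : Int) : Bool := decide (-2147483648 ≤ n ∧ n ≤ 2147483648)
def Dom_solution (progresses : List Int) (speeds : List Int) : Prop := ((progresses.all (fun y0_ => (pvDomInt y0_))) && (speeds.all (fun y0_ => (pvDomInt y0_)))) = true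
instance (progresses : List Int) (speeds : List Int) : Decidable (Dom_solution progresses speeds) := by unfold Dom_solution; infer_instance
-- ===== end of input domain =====

-- B replaces A's day-by-day simulation (which also empties its argument lists in place;
-- equivalence here is about the RETURN value only) with closed-form finish days (ceiling
-- division) and one grouping pass; intended as faster (in a timing run A timed out at
-- n=16 where B returned, so no ratio could be measured).


-- ===== PORT A =====
-- the inner `while progresses[0] >= 100: pop(0)` loop
def innerA : List Int → List Int → Int → Int × List Int × List Int
  | [], sp, suc => (suc, [], sp)
  | q :: qs, sp, suc => if 100 ≤ q then innerA qs sp.tail (suc + 1) else (suc, q :: qs, sp)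

-- the outer `while len(progresses) > 0` loop; `fuel` only makes the recursion total,
-- it is proved sufficient under Pre_solution
def loopA : Nat → List Int → List Int → List Int → List Int
  | 0, _, _, ans => ans
  | fuel + 1, pr, sp, ans =>
    if 0 < pr.length then
      match innerA (List.zipWith (· + ·) pr sp) sp 0 with
      | (suc, pr2, sp2) => loopA fuel pr2 sp2 (if 0 < suc then ans ++ [suc] else ans)
    else ans

def solution (progresses : List Int) (speeds : List Int) : List Int :=
  loopA ((progresses.map (fun p => (100 - p).toNat + 1)).sum + 1) progresses speeds []

-- ===== PORT B =====
-- days a task needs: max(1, -(-(100 - p) // s))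
def dayFn (p s : Int) : Int := max 1 (-(PySem.Int.floordiv (-(100 - p)) s))

theorem dropWhile_len_le (p : Int → Bool) (l : List Int) :
    (l.dropWhile p).length ≤ l.length :=
  (List.dropWhile_sublist p).length_le

-- the outer index loop of Source B: one group per leading day value
def groupRun : List Int → List Int
  | [] => []
  | d :: rest =>
    ((1 : Int) + (rest.takeWhile (fun x => decide (x ≤ d))).length)
      :: groupRun (rest.dropWhile (fun x => decide (x ≤ d)))
  termination_by l => l.length
  decreasing_by
    simp only [List.length_cons]
    exact Nat.lt_succ_of_le (dropWhile_len_le _ _)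

def solution_alt (progresses : List Int) (speeds : List Int) : List Int :=
  groupRun (List.zipWith dayFn progresses speeds)

-- ===== PRECONDITION & SPEC =====
-- Pre_ excludes inputs where some relevant speed is ≤ 0 (A then loops forever unless the
-- affected tasks happen to be past 100 on the day they reach the front) and inputs with
-- fewer speeds than progresses (A raises IndexError).
def Pre_solution (progresses : List Int) (speeds : List Int) : Prop :=
  progresses.length ≤ speeds.length ∧ ∀ s ∈ speeds.take progresses.length, 1 ≤ s
instance (progresses : List Int) (speeds : List Int) : Decidable (Pre_solution progresses speeds) := by
  unfold Pre_solution; infer_instance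

def pvWitness_solution : List Int × List Int := ([30, 99], [30, 1])

def Spec_solution (progresses : List Int) (speeds : List Int) (out : List Int) : Prop := out = solution_alt progresses speeds
instance (progresses : List Int) (speeds : List Int) (out : List Int) : Decidable (Spec_solution progresses speeds out) := by unfold Spec_solution; infer_instance

-- ===== CLAIM (what is proved, stated in full; the proofs are below) =====
def Claim_equal_solution : Prop := ∀ (progresses : List Int) (speeds : List Int), Dom_solution progresses speeds → Pre_solution progresses speeds → Spec_solution progresses speeds (solution progresses speeds)

-- ===== LEMMAS AND PROOFS =====

-- current progress values on day t, in terms of the original inputs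
def curVals (pr sp : List Int) (t : Int) : List Int :=
  List.zipWith (fun p s => p + t * s) pr sp

theorem curVals_zero (pr : List Int) : ∀ sp : List Int, pr.length ≤ sp.length →
    curVals pr sp 0 = pr := by
  induction pr with
  | nil => intro sp _; rfl
  | cons p ps ih =>
    intro sp hlen
    cases sp with
    | nil => simp at hlen
    | cons s ss =>
      show (p + 0 * s) :: curVals ps ss 0 = p :: ps
      rw [ih ss (by simpa using hlen)]
      norm_num

theorem curVals_step (pr : List Int) : ∀ (sp : List Int) (t : Int),
    List.zipWith (· + ·) (curVals pr sp t) sp = curVals pr sp (t + 1) := by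
  induction pr with
  | nil => intro sp t; rfl
  | cons p ps ih =>
    intro sp t
    cases sp with
    | nil => rfl
    | cons s ss =>
      simp only [curVals, List.zipWith_cons_cons] at *
      rw [ih ss t]
      congr 1
      ring

theorem pop_iff (p s t : Int) (hs : 1 ≤ s) (ht : 1 ≤ t) :
    (100 ≤ p + t * s) ↔ dayFn p s ≤ t := by
  have hb := (PySem.Int.neg_floordiv_neg_eq_iff_of_pos (a := 100 - p) (b := s)
    (q := -(PySem.Int.floordiv (-(100 - p)) s)) (by omega)).mp rfl
  set c := -(PySem.Int.floordiv (-(100 - p)) s) with hc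
  obtain ⟨h1, h2⟩ := hb
  unfold dayFn
  rw [← hc, max_le_iff]
  constructor
  · intro h
    refine ⟨ht, ?_⟩
    by_contra hlt
    rw [not_le] at hlt
    have : t * s ≤ (c - 1) * s := mul_le_mul_of_nonneg_right (by omega) (by omega)
    omega
  · intro h
    have : c * s ≤ t * s := mul_le_mul_of_nonneg_right h.2 (by omega)
    omega

theorem dayFn_ge_one (p s : Int) : 1 ≤ dayFn p s := le_max_left _ _

theorem dayFn_le (p s : Int) (hs : 1 ≤ s) : dayFn p s ≤ ((100 - p).toNat : Int) + 1 := by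
  have hb := (PySem.Int.neg_floordiv_neg_eq_iff_of_pos (a := 100 - p) (b := s)
    (q := -(PySem.Int.floordiv (-(100 - p)) s)) (by omega)).mp rfl
  set c := -(PySem.Int.floordiv (-(100 - p)) s) with hc
  obtain ⟨h1, h2⟩ := hb
  have hcb : c ≤ 100 - p ∨ c ≤ 0 := by
    by_cases h : 1 ≤ c
    · left
      have : (c - 1) * 1 ≤ (c - 1) * s := mul_le_mul_of_nonneg_left hs (by omega)
      omega
    · right; omega
  unfold dayFn
  rw [← hc, max_le_iff]
  omega

-- length of the prefix popped on day t
def kOf (pr sp : List Int) (t : Int) : Nat :=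
  ((List.zipWith dayFn pr sp).takeWhile (fun d => decide (d ≤ t))).length

theorem innerA_spec (pr : List Int) : ∀ (sp : List Int) (t suc : Int),
    pr.length ≤ sp.length → (∀ s ∈ sp.take pr.length, 1 ≤ s) → 1 ≤ t →
    innerA (curVals pr sp t) sp suc =
      (suc + (kOf pr sp t : Int), curVals (pr.drop (kOf pr sp t)) (sp.drop (kOf pr sp t)) t,
        sp.drop (kOf pr sp t)) := by
  induction pr with
  | nil => intro sp t suc _ _ _; simp [innerA, curVals, kOf]
  | cons p ps ih =>
    intro sp t suc hlen hsp ht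
    cases sp with
    | nil => simp at hlen
    | cons s ss =>
      have hlen' : ps.length ≤ ss.length := by simpa using hlen
      have hs1 : (1 : Int) ≤ s := hsp s (by simp)
      have hsp' : ∀ x ∈ ss.take ps.length, (1 : Int) ≤ x := fun x hx =>
        hsp x (by rw [List.length_cons, List.take_succ_cons]; exact List.mem_cons_of_mem _ hx)
      have hcur : curVals (p :: ps) (s :: ss) t = (p + t * s) :: curVals ps ss t := rfl
      by_cases hpop : 100 ≤ p + t * s
      · have hd : dayFn p s ≤ t := (pop_iff p s t hs1 ht).mp hpop
        have hk : kOf (p :: ps) (s :: ss) t = kOf ps ss t + 1 := by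
          unfold kOf
          rw [List.zipWith_cons_cons, List.takeWhile_cons_of_pos (by simpa using hd)]
          simp
        rw [hcur]
        simp only [innerA, if_pos hpop, List.tail_cons]
        rw [ih ss t (suc + 1) hlen' hsp' ht, hk]
        have hcast : suc + 1 + ((kOf ps ss t : Nat) : Int) =
            suc + ((kOf ps ss t + 1 : Nat) : Int) := by push_cast; ring
        simp only [List.drop_succ_cons, hcast]
      · have hd : ¬ dayFn p s ≤ t := fun h => hpop ((pop_iff p s t hs1 ht).mpr h)
        have hk : kOf (p :: ps) (s :: ss) t = 0 := by
          unfold kOf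
          rw [List.zipWith_cons_cons, List.takeWhile_cons_of_neg (by simpa using hd)]
          rfl
        rw [hcur]
        simp only [innerA, if_neg hpop]
        rw [hk]
        simp only [List.drop_zero, hcur, Nat.cast_zero, add_zero]

-- drop (takeWhile length) = dropWhile
theorem drop_takeWhile_length (p : Int → Bool) (l : List Int) :
    l.drop (l.takeWhile p).length = l.dropWhile p := by
  induction l with
  | nil => rfl
  | cons x xs ih =>
    by_cases h : p x
    · simp [List.takeWhile_cons_of_pos h, List.dropWhile_cons_of_pos h, ih]
    · simp [List.takeWhile_cons_of_neg h, List.dropWhile_cons_of_neg h]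

theorem head?_dropWhile_false (p : Int → Bool) (l : List Int) (d : Int)
    (h : (l.dropWhile p).head? = some d) : p d = false := by
  induction l with
  | nil => simp [List.dropWhile] at h
  | cons x xs ih =>
    by_cases hx : p x
    · rw [List.dropWhile_cons_of_pos hx] at h; exact ih h
    · rw [List.dropWhile_cons_of_neg hx] at h
      simp at h
      subst h
      simpa using hx

theorem loopA_spec (fuel : Nat) : ∀ (pr sp : List Int) (t : Int) (ans : List Int),
    pr.length ≤ sp.length → (∀ s ∈ sp.take pr.length, 1 ≤ s) → 0 ≤ t →
    (∀ d, (List.zipWith dayFn pr sp).head? = some d → t < d) →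
    (∀ d ∈ List.zipWith dayFn pr sp, d ≤ t + fuel) →
    loopA fuel (curVals pr sp t) sp ans = ans ++ groupRun (List.zipWith dayFn pr sp) := by
  induction fuel with
  | zero =>
    intro pr sp t ans hlen hsp ht hhead hfuel
    cases pr with
    | nil => simp [loopA, groupRun]
    | cons p ps =>
      cases sp with
      | nil => simp at hlen
      | cons s ss =>
        exfalso
        have h1 := hhead (dayFn p s) (by simp)
        have h2 := hfuel (dayFn p s) (by simp)
        omega
  | succ fuel ih =>
    intro pr sp t ans hlen hsp ht hhead hfuel
    cases pr with
    | nil => simp [loopA, curVals, groupRun]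
    | cons p ps =>
      cases sp with
      | nil => simp at hlen
      | cons s ss =>
        have hs1 : (1 : Int) ≤ s := hsp s (by simp)
        have hsp' : ∀ x ∈ ss.take ps.length, (1 : Int) ≤ x := fun x hx =>
          hsp x (by rw [List.length_cons, List.take_succ_cons]; exact List.mem_cons_of_mem _ hx)
        have hlen' : ps.length ≤ ss.length := by simpa using hlen
        have hne : 0 < (curVals (p :: ps) (s :: ss) t).length := by simp [curVals]
        have hd0 : t < dayFn p s := hhead (dayFn p s) (by simp)
        have hstep := curVals_step (p :: ps) (s :: ss) t
        have hinner := innerA_spec (p :: ps) (s :: ss) (t + 1) 0 hlen hsp (by omega)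
        simp only [loopA, if_pos hne, hstep, hinner]
        by_cases hcase : dayFn p s ≤ t + 1
        · have hd0eq : dayFn p s = t + 1 := by omega
          have hk : kOf (p :: ps) (s :: ss) (t + 1) =
              ((List.zipWith dayFn ps ss).takeWhile (fun x => decide (x ≤ t + 1))).length + 1 := by
            unfold kOf
            rw [List.zipWith_cons_cons, List.takeWhile_cons_of_pos (by simpa using hcase)]
            simp
          set k' := ((List.zipWith dayFn ps ss).takeWhile (fun x => decide (x ≤ t + 1))).length with hk'
          rw [hk]
          have hpos : (0 : Int) < 0 + ((k' + 1 : Nat) : Int) := by push_cast; omega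
          rw [if_pos hpos]
          simp only [List.drop_succ_cons]
          have hdw : (List.zipWith dayFn ps ss).drop k' =
              (List.zipWith dayFn ps ss).dropWhile (fun x => decide (x ≤ t + 1)) := by
            rw [hk', drop_takeWhile_length]
          have ihres := ih (ps.drop k') (ss.drop k') (t + 1) (ans ++ [0 + ((k' + 1 : Nat) : Int)])
            (by simp only [List.length_drop]; omega)
            (by
              intro x hx
              apply hsp'
              have hx' : x ∈ (ss.take ps.length).drop k' := by
                rw [List.drop_take]
                simpa [List.length_drop] using hx
              exact List.mem_of_mem_drop hx')
            (by omega)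
            (by
              intro d hdh
              rw [← List.drop_zipWith, hdw] at hdh
              have := head?_dropWhile_false _ _ _ hdh
              simp at this
              omega)
            (by
              intro d hdm
              rw [← List.drop_zipWith] at hdm
              have : d ∈ List.zipWith dayFn (p :: ps) (s :: ss) :=
                List.mem_cons_of_mem _ (List.mem_of_mem_drop hdm)
              have := hfuel d this
              omega)
          rw [ihres]
          rw [← List.drop_zipWith, hdw]
          show _ = ans ++ groupRun (dayFn p s :: List.zipWith dayFn ps ss)
          rw [groupRun, hd0eq, ← hk']
          have hval : (0 : Int) + ((k' + 1 : Nat) : Int) = 1 + (k' : Int) := by push_cast; ring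
          rw [hval]
          simp
        · have hk : kOf (p :: ps) (s :: ss) (t + 1) = 0 := by
            unfold kOf
            rw [List.zipWith_cons_cons, List.takeWhile_cons_of_neg (by simpa using hcase)]
            rfl
          rw [hk]
          norm_num
          exact ih (p :: ps) (s :: ss) (t + 1) ans hlen hsp (by omega)
            (fun d hdh => by simp at hdh; omega)
            (fun d hdm => by have := hfuel d hdm; omega)

theorem dayFn_mem_bounds (pr : List Int) : ∀ (sp : List Int),
    pr.length ≤ sp.length → (∀ s ∈ sp.take pr.length, 1 ≤ s) →
    ∀ d ∈ List.zipWith dayFn pr sp,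
      1 ≤ d ∧ d ≤ (((pr.map (fun p => (100 - p).toNat + 1)).sum : Nat) : Int) := by
  induction pr with
  | nil => intro sp _ _ d hd; simp at hd
  | cons p ps ih =>
    intro sp hlen hsp d hd
    cases sp with
    | nil => simp at hlen
    | cons s ss =>
      have hlen' : ps.length ≤ ss.length := by simpa using hlen
      have hs1 : (1 : Int) ≤ s := hsp s (by simp)
      have hsp' : ∀ x ∈ ss.take ps.length, (1 : Int) ≤ x := fun x hx =>
        hsp x (by rw [List.length_cons, List.take_succ_cons]; exact List.mem_cons_of_mem _ hx)
      rw [List.zipWith_cons_cons, List.mem_cons] at hd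
      rcases hd with hd | hd
      · subst hd
        refine ⟨dayFn_ge_one p s, ?_⟩
        have h1 := dayFn_le p s hs1
        simp only [List.map_cons, List.sum_cons, Nat.cast_add, Nat.cast_one]
        omega
      · have := ih ss hlen' hsp' d hd
        simp only [List.map_cons, List.sum_cons, Nat.cast_add, Nat.cast_one]
        omega

-- ===== VERDICT (by name: the statement is the Claim_ definition above) =====
theorem solution_spec : Claim_equal_solution := by
  intro pr sp _ hpre
  obtain ⟨hlen, hsp⟩ := hpre
  unfold Spec_solution solution solution_alt
  have hb := dayFn_mem_bounds pr sp hlen hsp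
  have hmain := loopA_spec ((pr.map (fun p => (100 - p).toNat + 1)).sum + 1) pr sp 0 []
    hlen hsp le_rfl
    (fun d hd => by have := (hb d (List.mem_of_mem_head? hd)).1; omega)
    (fun d hd => by have := (hb d hd).2; rw [Nat.cast_add, Nat.cast_one]; omega)
  rw [curVals_zero pr sp hlen] at hmain
  simpa using hmain
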